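-- pv_equiv track=rewrite | github.com/Enzobrt/Retos-de-programacion-Python | dibujar_circulo/coordenadas_circulo.py | coordenadas_del_circulo
-- ===== SOURCE A (Python) =====
-- import math as m
--
-- def coordenadas_del_circulo(r):
--     """La funcion coordenadas del circulo recibe como input
--     un radio y devuelve la coordenadas de un
--     octavo del circulo de ese radio"""
--     x_actual = 0
--     y_actual = m.floor(r)
--     coordenadas = []
--     while y_actual >= x_actual:
--         coordenadas.append([x_actual, y_actual])
--         x_actual += 1
--         if x_actual**2 + y_actual**2 > r**2:
--             y_actual -= 1
--     return coordenadas
-- ===== SOURCE B (Python) =====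
-- import math as m
--
-- def coordenadas_del_circulo(r):
--     """Per-column closed form: y = isqrt(r^2 - x^2) for each x, stop when y < x."""
--     coordenadas = []
--     for x in range(r + 1):
--         y = m.isqrt(r * r - x * x)
--         if y < x:
--             break
--         coordenadas.append([x, y])
--     return coordenadas
-- ===== Notes on version B (the rewrite author's own statement) =====
-- stated objective: alternative
-- what changed: Replaces A's incremental octant walk (one shared y decremented as x advances) with an independent per-column closed form y = isqrt(r*r - x*x), breaking when y < x.
import Mathlib
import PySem

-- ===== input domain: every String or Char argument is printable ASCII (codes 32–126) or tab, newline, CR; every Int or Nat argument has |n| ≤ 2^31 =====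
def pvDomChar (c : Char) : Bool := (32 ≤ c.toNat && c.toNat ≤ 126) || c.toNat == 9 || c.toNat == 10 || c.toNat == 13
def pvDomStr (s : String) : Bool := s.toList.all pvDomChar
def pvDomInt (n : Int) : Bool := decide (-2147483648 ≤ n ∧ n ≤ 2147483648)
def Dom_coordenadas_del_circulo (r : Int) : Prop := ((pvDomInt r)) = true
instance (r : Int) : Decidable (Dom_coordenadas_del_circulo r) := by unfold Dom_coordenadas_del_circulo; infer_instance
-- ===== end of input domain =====

-- B computes each column y = isqrt(r^2 - x^2) directly instead of A's incremental y tracking; objective: alternative.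


-- ===== PORT A =====
-- A's while-loop: x increases, y decreases by 0/1; terminates since y - x strictly decreases.
def pvA_loop (r x y : Int) : List (List Int) :=
  if y ≥ x then
    [x, y] :: pvA_loop r (x + 1) (if (x + 1) * (x + 1) + y * y > r * r then y - 1 else y)
  else []
termination_by (y - x + 1).toNat
decreasing_by split <;> omega

def coordenadas_del_circulo (r : Int) : List (List Int) :=
  pvA_loop r 0 r

-- ===== PORT B =====
-- math.isqrt(r*r - x*x) ported as Nat.sqrt on toNat; exact at every call Source B makes,
-- since there x ≤ r and 0 ≤ x guarantee 0 ≤ r*r - x*x.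
def pvSqrtI (r x : Int) : Int := ((r * r - x * x).toNat.sqrt : Int)

-- Source B's for-range loop with break
def pvB_loop (r x : Int) : List (List Int) :=
  if x ≤ r then
    if pvSqrtI r x < x then []
    else [x, pvSqrtI r x] :: pvB_loop r (x + 1)
  else []
termination_by (r + 1 - x).toNat
decreasing_by omega

def coordenadas_del_circulo_alt (r : Int) : List (List Int) :=
  pvB_loop r 0

-- ===== PRECONDITION & SPEC =====
def Spec_coordenadas_del_circulo (r : Int) (out : List (List Int)) : Prop := out = coordenadas_del_circulo_alt r
instance (r : Int) (out : List (List Int)) : Decidable (Spec_coordenadas_del_circulo r out) := by unfold Spec_coordenadas_del_circulo; infer_instance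

-- ===== CLAIM (what is proved, stated in full; the proofs are below) =====
def Claim_equal_coordenadas_del_circulo : Prop := ∀ (r : Int), Dom_coordenadas_del_circulo r → Spec_coordenadas_del_circulo r (coordenadas_del_circulo r)

-- ===== LEMMAS AND PROOFS =====


theorem pvSqrtI_props (r x : Int) (h : 0 ≤ r * r - x * x) :
    0 ≤ pvSqrtI r x ∧ pvSqrtI r x * pvSqrtI r x ≤ r * r - x * x ∧
      r * r - x * x < (pvSqrtI r x + 1) * (pvSqrtI r x + 1) := by
  unfold pvSqrtI
  have h1 := Nat.sqrt_le' (r * r - x * x).toNat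
  have h2 := Nat.lt_succ_sqrt' (r * r - x * x).toNat
  rw [pow_two] at h1
  rw [Nat.succ_eq_add_one, pow_two] at h2
  have hmm : (((r * r - x * x).toNat : Nat) : Int) = r * r - x * x := Int.toNat_of_nonneg h
  refine ⟨Int.natCast_nonneg _, ?_, ?_⟩
  · rw [← hmm]; exact_mod_cast h1
  · rw [← hmm]; exact_mod_cast h2

theorem pv_floor_unique (m y1 y2 : Int) (h1 : 0 ≤ y1) (h2 : 0 ≤ y2)
    (hl1 : y1 * y1 ≤ m) (hu1 : m < (y1 + 1) * (y1 + 1))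
    (hl2 : y2 * y2 ≤ m) (hu2 : m < (y2 + 1) * (y2 + 1)) : y1 = y2 := by
  rcases lt_trichotomy y1 y2 with h | h | h
  · nlinarith
  · exact h
  · nlinarith

theorem pv_sqrtI_zero (r : Int) (hr : 0 ≤ r) : pvSqrtI r 0 = r := by
  obtain ⟨t, rfl⟩ := Int.eq_ofNat_of_zero_le hr
  unfold pvSqrtI
  have h1 : ((t : Int) * (t : Int) - 0 * 0).toNat = t * t := by push_cast; omega
  rw [h1, show t * t = t ^ 2 from (pow_two t).symm, Nat.sqrt_eq']

theorem pv_key (r : Int) (hr : 0 ≤ r) :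
    ∀ n x, (r - x).toNat = n → 0 ≤ x → x ≤ r →
      pvA_loop r x (pvSqrtI r x) = pvB_loop r x := by
  intro n
  induction n with
  | zero =>
    intro x hn hx hxr
    have hxr' : x = r := by omega
    subst hxr'
    have hy : pvSqrtI x x = 0 := by unfold pvSqrtI; simp
    by_cases h0 : 0 < x
    · rw [pvA_loop, if_neg (show ¬ pvSqrtI x x ≥ x by rw [hy]; omega),
        pvB_loop, if_pos (le_refl x), if_pos (show pvSqrtI x x < x by rw [hy]; omega)]
    · have hx0 : x = 0 := by omega
      subst hx0
      rw [hy, pvA_loop, if_pos (show (0:Int) ≥ 0 from le_refl 0),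
        if_pos (show ((0:Int) + 1) * (0 + 1) + 0 * 0 > 0 * 0 by norm_num),
        pvA_loop, if_neg (show ¬ (0:Int) - 1 ≥ 0 + 1 by omega),
        pvB_loop, if_pos (le_refl (0:Int)), hy, if_neg (show ¬ (0:Int) < 0 by omega),
        pvB_loop, if_neg (show ¬ (0:Int) + 1 ≤ 0 by omega)]
  | succ n ih =>
    intro x hn hx hxr
    have hxlt : x < r := by omega
    have hnn : 0 ≤ r * r - x * x := by nlinarith
    obtain ⟨hy0, hyl, hyu⟩ := pvSqrtI_props r x hnn
    by_cases hyx : pvSqrtI r x ≥ x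
    · rw [pvA_loop, if_pos hyx, pvB_loop, if_pos hxr,
        if_neg (show ¬ pvSqrtI r x < x by omega)]
      have hnn1 : 0 ≤ r * r - (x + 1) * (x + 1) := by nlinarith
      obtain ⟨hb0, hbl, hbu⟩ := pvSqrtI_props r (x + 1) hnn1
      congr 1
      by_cases heq : pvSqrtI r x = x
      · -- boundary column y = x: both tails are empty
        have hbend : pvSqrtI r (x + 1) < x + 1 := by nlinarith
        have hB : pvB_loop r (x + 1) = [] := by
          by_cases hc : x + 1 ≤ r
          · rw [pvB_loop, if_pos hc, if_pos hbend]
          · rw [pvB_loop, if_neg hc]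
        have hA : pvA_loop r (x + 1)
            (if (x + 1) * (x + 1) + pvSqrtI r x * pvSqrtI r x > r * r
              then pvSqrtI r x - 1 else pvSqrtI r x) = [] := by
          by_cases hc : (x + 1) * (x + 1) + pvSqrtI r x * pvSqrtI r x > r * r
          · rw [if_pos hc, pvA_loop, if_neg (show ¬ pvSqrtI r x - 1 ≥ x + 1 by omega)]
          · rw [if_neg hc, pvA_loop, if_neg (show ¬ pvSqrtI r x ≥ x + 1 by omega)]
        rw [hA, hB]
      · have hygt : pvSqrtI r x > x := by omega
        have hstep : (if (x + 1) * (x + 1) + pvSqrtI r x * pvSqrtI r x > r * r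
              then pvSqrtI r x - 1 else pvSqrtI r x) = pvSqrtI r (x + 1) := by
          by_cases hc : (x + 1) * (x + 1) + pvSqrtI r x * pvSqrtI r x > r * r
          · rw [if_pos hc]
            refine pv_floor_unique (r * r - (x + 1) * (x + 1)) _ _ (by omega) hb0 ?_ ?_ hbl hbu
            · nlinarith
            · nlinarith
          · rw [if_neg hc]
            refine pv_floor_unique (r * r - (x + 1) * (x + 1)) _ _ (by omega) hb0 ?_ ?_ hbl hbu
            · linarith
            · nlinarith
        rw [hstep]
        exact ih (x + 1) (by omega) (by omega) (by omega)
    · rw [pvA_loop, if_neg hyx, pvB_loop, if_pos hxr,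
        if_pos (show pvSqrtI r x < x by omega)]

theorem pv_main (r : Int) : coordenadas_del_circulo r = coordenadas_del_circulo_alt r := by
  unfold coordenadas_del_circulo coordenadas_del_circulo_alt
  by_cases hr : 0 ≤ r
  · have := pv_key r hr (r - 0).toNat 0 rfl (le_refl _) hr
    rwa [pv_sqrtI_zero r hr] at this
  · rw [pvA_loop, if_neg (by omega), pvB_loop, if_neg (by omega)]

-- ===== VERDICT (by name: the statement is the Claim_ definition above) =====
theorem coordenadas_del_circulo_spec : Claim_equal_coordenadas_del_circulo :=
  fun r _ => pv_main r
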